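-- pv_equiv track=rewrite | github.com/RamnathKumar181/Brain-based-Subject-Identification | src/loader.py | split_dataset_intruder
-- ===== SOURCE A (Python) =====
-- def split_dataset_intruder(dataset, test_split,total_count,threshold):
--     X = []
--     y = []
--     for i in range(len(dataset)):
--         if(total_count[dataset[i][1]]<threshold):
--             X.append(dataset[i][0])
--             y.append(1)
--     num_intruders = len(X)
--     count=0
--     for i in range(len(dataset)):
--         if(total_count[dataset[i][1]]>=threshold and count<num_intruders):
--             X.append(dataset[i][0])
--             y.append(0)
--             count+=1
--     return X,y
-- ===== SOURCE B (Python) =====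
-- def split_dataset_intruder(dataset, test_split, total_count, threshold):
--     intruders = []
--     normals = []
--     for x, lab in dataset:
--         (intruders if total_count[lab] < threshold else normals).append(x)
--     picked = normals[:len(intruders)]
--     return intruders + picked, [1] * len(intruders) + [0] * len(picked)
-- ===== Notes on version B (the rewrite author's own statement) =====
-- stated objective: simpler
-- what changed: One full left-to-right partition into intruders/normals replaces A's two index loops; the count-limited second loop becomes a slice normals[:n], and the labels become two replicated blocks instead of interleaved appends.
import Mathlib
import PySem

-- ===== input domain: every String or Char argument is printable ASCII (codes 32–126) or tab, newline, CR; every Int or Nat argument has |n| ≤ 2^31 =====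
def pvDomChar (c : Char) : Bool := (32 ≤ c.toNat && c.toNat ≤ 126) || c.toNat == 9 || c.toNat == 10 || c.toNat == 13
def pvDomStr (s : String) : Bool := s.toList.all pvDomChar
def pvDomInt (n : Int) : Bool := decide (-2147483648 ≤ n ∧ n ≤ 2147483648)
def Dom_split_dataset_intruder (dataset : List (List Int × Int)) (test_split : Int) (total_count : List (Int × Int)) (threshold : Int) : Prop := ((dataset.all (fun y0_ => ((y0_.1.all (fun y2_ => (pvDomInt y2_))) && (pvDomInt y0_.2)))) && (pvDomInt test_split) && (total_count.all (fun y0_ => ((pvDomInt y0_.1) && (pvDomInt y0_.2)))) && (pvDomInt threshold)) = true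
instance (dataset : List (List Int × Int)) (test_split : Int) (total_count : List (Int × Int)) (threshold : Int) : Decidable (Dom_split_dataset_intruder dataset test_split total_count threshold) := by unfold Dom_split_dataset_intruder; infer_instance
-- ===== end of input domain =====

-- ===== PORT A =====
-- B changes the decomposition: one partition + a slice instead of A's two count-limited loops; same cost ("simpler").
-- Pre_ excludes inputs where a dataset label is missing from total_count (Python raises KeyError there).
-- Shared lookup helper: Python's total_count[lab] on the association list (first match).
def tcGet (tc : List (Int × Int)) (k : Int) : Option Int := (PySem.Dict.mk tc).get? k

def split_dataset_intruder (dataset : List (List Int × Int)) (test_split : Int) (total_count : List (Int × Int)) (threshold : Int) : List (List Int) × List Int :=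
  -- first loop: for i in range(len(dataset)): if total_count[dataset[i][1]] < threshold: append
  let Xy := dataset.foldl (fun (acc : List (List Int) × List Int) d =>
      if (tcGet total_count d.2).getD 0 < threshold then (acc.1 ++ [d.1], acc.2 ++ [(1 : Int)]) else acc)
    (([] : List (List Int)), ([] : List Int))
  let num_intruders : Int := Xy.1.length
  -- second loop with the running count
  let res := dataset.foldl (fun (acc : (List (List Int) × List Int) × Int) d =>
      if threshold ≤ (tcGet total_count d.2).getD 0 ∧ acc.2 < num_intruders then
        ((acc.1.1 ++ [d.1], acc.1.2 ++ [(0 : Int)]), acc.2 + 1)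
      else acc)
    ((Xy.1, Xy.2), (0 : Int))
  res.1

-- ===== PORT B =====
def split_dataset_intruder_alt (dataset : List (List Int × Int)) (test_split : Int) (total_count : List (Int × Int)) (threshold : Int) : List (List Int) × List Int :=
  let intruders := (dataset.filter (fun d => (tcGet total_count d.2).getD 0 < threshold)).map Prod.fst
  let normals := (dataset.filter (fun d => ¬ ((tcGet total_count d.2).getD 0 < threshold))).map Prod.fst
  let picked := normals.take intruders.length
  (intruders ++ picked, List.replicate intruders.length (1 : Int) ++ List.replicate picked.length (0 : Int))

-- ===== PRECONDITION & SPEC =====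
-- Pre_: every label occurring in dataset is a key of total_count (otherwise Python raises KeyError).
def Pre_split_dataset_intruder (dataset : List (List Int × Int)) (test_split : Int) (total_count : List (Int × Int)) (threshold : Int) : Prop :=
  (dataset.all (fun d => (tcGet total_count d.2).isSome)) = true
instance (dataset : List (List Int × Int)) (test_split : Int) (total_count : List (Int × Int)) (threshold : Int) : Decidable (Pre_split_dataset_intruder dataset test_split total_count threshold) := by unfold Pre_split_dataset_intruder; infer_instance
def pvWitness_split_dataset_intruder : (List (List Int × Int)) × Int × (List (Int × Int)) × Int :=
  ([([1], 0), ([2], 1), ([3], 0)], 0, [(0, 2), (1, 1)], 2)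
def Spec_split_dataset_intruder (dataset : List (List Int × Int)) (test_split : Int) (total_count : List (Int × Int)) (threshold : Int) (out : List (List Int) × List Int) : Prop := out = split_dataset_intruder_alt dataset test_split total_count threshold
instance (dataset : List (List Int × Int)) (test_split : Int) (total_count : List (Int × Int)) (threshold : Int) (out : List (List Int) × List Int) : Decidable (Spec_split_dataset_intruder dataset test_split total_count threshold out) := by unfold Spec_split_dataset_intruder; infer_instance

-- ===== CLAIM (what is proved, stated in full; the proofs are below) =====
def Claim_equal_split_dataset_intruder : Prop := ∀ (dataset : List (List Int × Int)) (test_split : Int) (total_count : List (Int × Int)) (threshold : Int), Dom_split_dataset_intruder dataset test_split total_count threshold → Pre_split_dataset_intruder dataset test_split total_count threshold → Spec_split_dataset_intruder dataset test_split total_count threshold (split_dataset_intruder dataset test_split total_count threshold)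

-- ===== LEMMAS AND PROOFS =====

-- The first loop appends, in order, exactly the filtered intruders and a 1 per intruder.
theorem loop1_char (tc : List (Int × Int)) (th : Int) :
    ∀ (ds : List (List Int × Int)) (acc : List (List Int) × List Int),
      ds.foldl (fun (acc : List (List Int) × List Int) d =>
          if (tcGet tc d.2).getD 0 < th then (acc.1 ++ [d.1], acc.2 ++ [(1 : Int)]) else acc) acc
      = (acc.1 ++ (ds.filter (fun d => (tcGet tc d.2).getD 0 < th)).map Prod.fst,
         acc.2 ++ List.replicate (ds.filter (fun d => (tcGet tc d.2).getD 0 < th)).length (1 : Int)) := by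
  intro ds
  induction ds with
  | nil => intro acc; simp
  | cons d ds ih =>
    intro acc
    by_cases h : (tcGet tc d.2).getD 0 < th
    · simp [List.foldl_cons, h, ih]
      rw [← List.replicate_succ, List.replicate_succ']
    · simp [List.foldl_cons, h, ih]

-- The second loop, started at count c with bound num, appends the first (num-c) normals.
theorem loop2_char (tc : List (Int × Int)) (th num : Int) :
    ∀ (ds : List (List Int × Int)) (X : List (List Int)) (y : List Int) (c : Int),
      ds.foldl (fun (acc : (List (List Int) × List Int) × Int) d =>
          if th ≤ (tcGet tc d.2).getD 0 ∧ acc.2 < num then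
            ((acc.1.1 ++ [d.1], acc.1.2 ++ [(0 : Int)]), acc.2 + 1)
          else acc) ((X, y), c)
      = ((X ++ ((ds.filter (fun d => !decide ((tcGet tc d.2).getD 0 < th))).map Prod.fst).take (num - c).toNat,
          y ++ List.replicate (((ds.filter (fun d => !decide ((tcGet tc d.2).getD 0 < th))).map Prod.fst).take (num - c).toNat).length (0 : Int)),
         c + ((((ds.filter (fun d => !decide ((tcGet tc d.2).getD 0 < th))).map Prod.fst).take (num - c).toNat).length : Int)) := by
  intro ds
  induction ds with
  | nil => intro X y c; simp
  | cons d ds ih =>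
    intro X y c
    by_cases h : th ≤ (tcGet tc d.2).getD 0
    · have hnot : ¬ ((tcGet tc d.2).getD 0 < th) := not_lt.mpr h
      by_cases hc : c < num
      · have h1 : (num - c).toNat = ((num - (c + 1)).toNat) + 1 := by omega
        simp only [List.foldl_cons, if_pos (And.intro h hc), List.filter_cons, hnot,
          decide_false, Bool.not_false, if_pos]
        rw [ih]
        simp [h1, List.take_succ_cons, List.replicate_succ']
        refine ⟨?_, by omega⟩
        rw [← List.replicate_succ, List.replicate_succ']
      · have h0 : (num - c).toNat = 0 := by omega
        simp only [List.foldl_cons,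
          if_neg (show ¬ (th ≤ (tcGet tc d.2).getD 0 ∧ c < num) by tauto)]
        rw [ih]
        simp [h0]
    · have hlt : (tcGet tc d.2).getD 0 < th := lt_of_not_ge h
      simp only [List.foldl_cons,
        if_neg (show ¬ (th ≤ (tcGet tc d.2).getD 0 ∧ c < num) by tauto)]
      rw [ih]
      simp [hlt]

-- Within Int, not (a < b) is b ≤ a: the two normal-filters coincide.
theorem filt_eq (tc : List (Int × Int)) (th : Int) (ds : List (List Int × Int)) :
    ds.filter (fun d => !decide ((tcGet tc d.2).getD 0 < th))
      = ds.filter (fun d => decide (th ≤ (tcGet tc d.2).getD 0)) := by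
  apply List.filter_congr
  intro x _
  simp [← decide_not]

-- ===== VERDICT (by name: the statement is the Claim_ definition above) =====
theorem split_dataset_intruder_spec : Claim_equal_split_dataset_intruder := by
  intro dataset test_split total_count threshold _ _
  unfold Spec_split_dataset_intruder split_dataset_intruder split_dataset_intruder_alt
  simp only [loop1_char, loop2_char, filt_eq, List.nil_append]
  simp
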